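-- pv_equiv track=rewrite | github.com/JannickMueller-Whispyr/guild_autosim | append.py | should_append
-- ===== SOURCE A (Python) =====
-- CLOTH_CLASSES = {"mage", "priest", "warlock"}
--
-- LEATHER_CLASSES = {"rogue", "druid", "monk", "demonhunter"}
--
-- MAIL_CLASSES = {"hunter", "shaman", "evoker"}
--
-- PLATE_CLASSES = {"warrior", "paladin", "deathknight"}
--
-- INT_SPECS = {
--     "arcane", "fire", "frost", "balance", "restoration", "discipline", "holy", "shadow",
--     "elemental", "affliction", "demonology", "destruction", "mistweaver",
--     "devastation", "preservation", "augmentation"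
-- }
--
-- AGI_SPECS = {
--     "assassination", "outlaw", "subtlety", "feral", "guardian", "windwalker",
--     "havoc", "vengeance", "beast_mastery", "marksmanship", "survival"
-- }
--
-- STR_SPECS = {
--     "arms", "fury", "protection", "retribution", "blood", "frost", "unholy"
-- }
--
-- def should_append(filename, comment):
--     fname = filename.lower()
--     comment = comment.lower()
--     # Armor type checks
--     if "cloth" in comment:
--         if not any(f"_{cls}_" in f"_{fname}_" for cls in CLOTH_CLASSES):
--             return False
--     if "leather" in comment:
--         if not any(f"_{cls}_" in f"_{fname}_" for cls in LEATHER_CLASSES):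
--             return False
--     if "mail" in comment:
--         if not any(f"_{cls}_" in f"_{fname}_" for cls in MAIL_CLASSES):
--             return False
--     if "plate" in comment:
--         if not any(f"_{cls}_" in f"_{fname}_" for cls in PLATE_CLASSES):
--             return False
--     # Stat type checks (same logic can be applied if needed)
--     if "int" in comment:
--         if not any(f"_{spec}_" in f"_{fname}_" for spec in INT_SPECS):
--             return False
--     if "agi" in comment:
--         if not any(f"_{spec}_" in f"_{fname}_" for spec in AGI_SPECS):
--             return False
--     if "str" in comment:
--         if not any(f"_{spec}_" in f"_{fname}_" for spec in STR_SPECS):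
--             return False
--     return True
-- ===== SOURCE B (Python) =====
-- CLOTH_CLASSES = {"mage", "priest", "warlock"}
--
-- LEATHER_CLASSES = {"rogue", "druid", "monk", "demonhunter"}
--
-- MAIL_CLASSES = {"hunter", "shaman", "evoker"}
--
-- PLATE_CLASSES = {"warrior", "paladin", "deathknight"}
--
-- INT_SPECS = {
--     "arcane", "fire", "frost", "balance", "restoration", "discipline", "holy", "shadow",
--     "elemental", "affliction", "demonology", "destruction", "mistweaver",
--     "devastation", "preservation", "augmentation"
-- }
--
-- AGI_SPECS = {
--     "assassination", "outlaw", "subtlety", "feral", "guardian", "windwalker",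
--     "havoc", "vengeance", "beast_mastery", "marksmanship", "survival"
-- }
--
-- STR_SPECS = {
--     "arms", "fury", "protection", "retribution", "blood", "frost", "unholy"
-- }
--
-- RULES = [
--     ("cloth", CLOTH_CLASSES),
--     ("leather", LEATHER_CLASSES),
--     ("mail", MAIL_CLASSES),
--     ("plate", PLATE_CLASSES),
--     ("int", INT_SPECS),
--     ("agi", AGI_SPECS),
--     ("str", STR_SPECS),
-- ]
--
--
-- def _has_token_run(name, tokens):
--     # does name (itself split on '_') occur as a contiguous run of tokens?
--     parts = name.split("_")
--     k = len(parts)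
--     return any(tokens[i:i + k] == parts for i in range(len(tokens) - k + 1))
--
--
-- def should_append(filename, comment):
--     tokens = filename.lower().split("_")
--     c = comment.lower()
--     for keyword, names in RULES:
--         if keyword in c and not any(_has_token_run(n, tokens) for n in names):
--             return False
--     return True
-- ===== Notes on version B (the rewrite author's own statement) =====
-- stated objective: alternative
-- what changed: B tokenizes the filename once by splitting on '_' and drives a single loop over a (keyword, names) rules table, testing each name as a contiguous run of tokens, instead of A's seven unrolled blocks each scanning for an underscore-padded substring of a re-padded filename.
import Mathlib
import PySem

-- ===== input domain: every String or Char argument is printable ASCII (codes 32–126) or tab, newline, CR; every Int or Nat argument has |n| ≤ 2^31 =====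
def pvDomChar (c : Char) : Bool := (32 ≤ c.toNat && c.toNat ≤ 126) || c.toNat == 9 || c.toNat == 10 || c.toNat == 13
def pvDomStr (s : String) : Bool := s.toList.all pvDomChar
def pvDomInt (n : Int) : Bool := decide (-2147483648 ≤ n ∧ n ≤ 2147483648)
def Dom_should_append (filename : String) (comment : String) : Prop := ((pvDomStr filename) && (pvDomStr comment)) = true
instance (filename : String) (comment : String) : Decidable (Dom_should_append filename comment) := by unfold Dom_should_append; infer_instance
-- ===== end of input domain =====

-- B re-organises A: the filename is split into '_'-tokens once and a single loop over a
-- (keyword, names) rules table tests each name as a contiguous run of tokens, replacing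
-- A's seven unrolled underscore-padded substring scans; alternative structure, same cost class.

-- ===== PORT A =====
def CLOTH_CLASSES : PySem.Set String := PySem.Set.ofList ["mage", "priest", "warlock"]
def LEATHER_CLASSES : PySem.Set String := PySem.Set.ofList ["rogue", "druid", "monk", "demonhunter"]
def MAIL_CLASSES : PySem.Set String := PySem.Set.ofList ["hunter", "shaman", "evoker"]
def PLATE_CLASSES : PySem.Set String := PySem.Set.ofList ["warrior", "paladin", "deathknight"]
def INT_SPECS : PySem.Set String := PySem.Set.ofList ["arcane", "fire", "frost", "balance", "restoration", "discipline", "holy", "shadow", "elemental", "affliction", "demonology", "destruction", "mistweaver", "devastation", "preservation", "augmentation"]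
def AGI_SPECS : PySem.Set String := PySem.Set.ofList ["assassination", "outlaw", "subtlety", "feral", "guardian", "windwalker", "havoc", "vengeance", "beast_mastery", "marksmanship", "survival"]
def STR_SPECS : PySem.Set String := PySem.Set.ofList ["arms", "fury", "protection", "retribution", "blood", "frost", "unholy"]

-- f"_{cls}_" in f"_{fname}_" ported at the character-list level ('_' :: cls ++ ['_']): exact,
-- Python f-string concatenation of ASCII strings is list append on the code points.
def should_append (filename : String) (comment : String) : Bool :=
  let fname := (PySem.Str.lower filename).toList
  let c := (PySem.Str.lower comment).toList
  if PySem.Chars.isIn "cloth".toList c &&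
     !(CLOTH_CLASSES.any fun cls => PySem.Chars.isIn ('_' :: (cls.toList ++ ['_'])) ('_' :: (fname ++ ['_']))) then false
  else if PySem.Chars.isIn "leather".toList c &&
     !(LEATHER_CLASSES.any fun cls => PySem.Chars.isIn ('_' :: (cls.toList ++ ['_'])) ('_' :: (fname ++ ['_']))) then false
  else if PySem.Chars.isIn "mail".toList c &&
     !(MAIL_CLASSES.any fun cls => PySem.Chars.isIn ('_' :: (cls.toList ++ ['_'])) ('_' :: (fname ++ ['_']))) then false
  else if PySem.Chars.isIn "plate".toList c &&
     !(PLATE_CLASSES.any fun cls => PySem.Chars.isIn ('_' :: (cls.toList ++ ['_'])) ('_' :: (fname ++ ['_']))) then false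
  else if PySem.Chars.isIn "int".toList c &&
     !(INT_SPECS.any fun spec => PySem.Chars.isIn ('_' :: (spec.toList ++ ['_'])) ('_' :: (fname ++ ['_']))) then false
  else if PySem.Chars.isIn "agi".toList c &&
     !(AGI_SPECS.any fun spec => PySem.Chars.isIn ('_' :: (spec.toList ++ ['_'])) ('_' :: (fname ++ ['_']))) then false
  else if PySem.Chars.isIn "str".toList c &&
     !(STR_SPECS.any fun spec => PySem.Chars.isIn ('_' :: (spec.toList ++ ['_'])) ('_' :: (fname ++ ['_']))) then false
  else true

-- ===== PORT B =====
def RULES : List (String × List String) :=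
  [("cloth", ["mage", "priest", "warlock"]),
   ("leather", ["rogue", "druid", "monk", "demonhunter"]),
   ("mail", ["hunter", "shaman", "evoker"]),
   ("plate", ["warrior", "paladin", "deathknight"]),
   ("int", ["arcane", "fire", "frost", "balance", "restoration", "discipline", "holy", "shadow", "elemental", "affliction", "demonology", "destruction", "mistweaver", "devastation", "preservation", "augmentation"]),
   ("agi", ["assassination", "outlaw", "subtlety", "feral", "guardian", "windwalker", "havoc", "vengeance", "beast_mastery", "marksmanship", "survival"]),
   ("str", ["arms", "fury", "protection", "retribution", "blood", "frost", "unholy"])]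

-- _has_token_run: does name (split on '_') occur as a contiguous run of tokens?
def hasTokenRun (name : String) (tokens : List (List Char)) : Bool :=
  let parts := PySem.Chars.splitOn name.toList ['_']
  let k := parts.length
  (PySem.List.pyRange 0 ((tokens.length : Int) - (k : Int) + 1) 1).any fun i =>
    PySem.List.slice tokens (some i) (some (i + (k : Int))) == parts

-- the 'for keyword, names in RULES' loop with its early return False
def checkRules (tokens : List (List Char)) (c : List Char) : List (String × List String) → Bool
  | [] => true
  | (kw, names) :: rest =>
      if PySem.Chars.isIn kw.toList c && !(names.any fun n => hasTokenRun n tokens) then false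
      else checkRules tokens c rest

def should_append_alt (filename : String) (comment : String) : Bool :=
  let tokens := PySem.Chars.splitOn (PySem.Str.lower filename).toList ['_']
  let c := (PySem.Str.lower comment).toList
  checkRules tokens c RULES

-- ===== PRECONDITION & SPEC =====
def Spec_should_append (filename : String) (comment : String) (out : Bool) : Prop := out = should_append_alt filename comment
instance (filename : String) (comment : String) (out : Bool) : Decidable (Spec_should_append filename comment out) := by unfold Spec_should_append; infer_instance

-- ===== CLAIM (what is proved, stated in full; the proofs are below) =====
def Claim_equal_should_append : Prop := ∀ (filename : String) (comment : String), Dom_should_append filename comment → Spec_should_append filename comment (should_append filename comment)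

-- ===== LEMMAS AND PROOFS =====

-- myTokens s = s.split('_') as a clean structural recursion (proved equal to the PySem primitive below)
def myTokens : List Char → List (List Char)
  | [] => [[]]
  | c :: rest =>
      if c = '_' then [] :: myTokens rest
      else
        match myTokens rest with
        | [] => [[c]]
        | t :: ts => (c :: t) :: ts

-- pad ts = "_t0_t1_..._tn_" : the tokens re-joined with '_', wrapped in the two padding underscores
def pad : List (List Char) → List Char
  | [] => ['_']
  | t :: ts => '_' :: (t ++ pad ts)

def padOpen : List (List Char) → List Char
  | [] => []
  | t :: ts => '_' :: (t ++ padOpen ts)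

def consHead (pre : List Char) : List (List Char) → List (List Char)
  | [] => [pre]
  | t :: ts => (pre ++ t) :: ts

theorem myTokens_ne_nil (s : List Char) : myTokens s ≠ [] := by
  cases s with
  | nil => simp [myTokens]
  | cons c rest =>
    simp only [myTokens]; split
    · simp
    · split <;> simp

theorem splitOn_go_spec (fuel : Nat) : ∀ (s cur : List Char) (acc : List (List Char)),
    s.length ≤ fuel →
    PySem.Chars.splitOn.go ['_'] fuel s cur acc = acc.reverse ++ consHead cur.reverse (myTokens s) := by
  induction fuel with
  | zero =>
    intro s cur acc h
    have hs : s = [] := by cases s <;> simp_all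
    subst hs
    rw [PySem.Chars.splitOn.go.eq_def]
    simp [myTokens, consHead]
  | succ n ih =>
    intro s cur acc h
    cases s with
    | nil =>
      rw [PySem.Chars.splitOn.go.eq_def]
      simp [myTokens, consHead]
    | cons c rest =>
      rw [PySem.Chars.splitOn.go.eq_def]
      simp only [List.isPrefixOf]
      by_cases hc : c = '_'
      · subst hc
        simp only [beq_self_eq_true, Bool.true_and]
        rw [if_pos (by simp)]
        simp only [List.length_cons, List.drop_succ_cons, List.length_nil, List.drop_zero] at *
        rw [ih rest [] (cur.reverse :: acc) (by omega)]
        rcases hmt : myTokens rest with _ | ⟨t, ts⟩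
        · exact absurd hmt (myTokens_ne_nil rest)
        · simp [myTokens, consHead, hmt]
      · rw [if_neg (by simp [Ne.symm hc])]
        rw [ih rest (c :: cur) acc (by simp at h ⊢; omega)]
        rcases hmt : myTokens rest with _ | ⟨t, ts⟩
        · exact absurd hmt (myTokens_ne_nil rest)
        · simp [myTokens, consHead, hmt, hc]

theorem splitOn_eq_myTokens (s : List Char) : PySem.Chars.splitOn s ['_'] = myTokens s := by
  unfold PySem.Chars.splitOn
  rw [splitOn_go_spec (s.length + 1) s [] [] (by omega)]
  rcases hmt : myTokens s with _ | ⟨t, ts⟩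
  · exact absurd hmt (myTokens_ne_nil s)
  · simp [consHead]

theorem myTokens_uf (s : List Char) : ∀ t ∈ myTokens s, '_' ∉ t := by
  induction s with
  | nil => simp [myTokens]
  | cons c rest ih =>
    simp only [myTokens]
    by_cases hc : c = '_'
    · simp only [if_pos hc]
      intro t ht
      rcases List.mem_cons.1 ht with h | h
      · simp [h]
      · exact ih t h
    · simp only [if_neg hc]
      rcases hmt : myTokens rest with _ | ⟨t0, ts⟩
      · exact absurd hmt (myTokens_ne_nil rest)
      · intro t ht
        rcases List.mem_cons.1 ht with h | h
        · subst h
          intro hm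
          rcases List.mem_cons.1 hm with h' | h'
          · exact hc h'.symm
          · exact ih t0 (by simp [hmt]) h'
        · exact ih t (by simp [hmt, h])

theorem pad_myTokens (s : List Char) : pad (myTokens s) = '_' :: (s ++ ['_']) := by
  induction s with
  | nil => simp [myTokens, pad]
  | cons c rest ih =>
    simp only [myTokens]
    by_cases hc : c = '_'
    · subst hc; simp [pad, ih]
    · rcases hmt : myTokens rest with _ | ⟨t0, ts⟩
      · exact absurd hmt (myTokens_ne_nil rest)
      · rw [hmt] at ih
        simp only [if_neg hc, pad] at ih ⊢
        injection ih with _ ih2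
        simp [ih2]

theorem pad_head (ts : List (List Char)) : ∃ u, pad ts = '_' :: u := by
  cases ts <;> exact ⟨_, rfl⟩

theorem pad_append (u v : List (List Char)) : pad (u ++ v) = padOpen u ++ pad v := by
  induction u with
  | nil => simp [padOpen]
  | cons t ts ih => simp [pad, padOpen, ih]

theorem pad_eq_padOpen (u : List (List Char)) : pad u = padOpen u ++ ['_'] := by
  induction u with
  | nil => simp [pad, padOpen]
  | cons t ts ih => simp [pad, padOpen, ih]

theorem uf_split (p : List Char) : ∀ (t a b : List Char), '_' ∉ p → '_' ∉ t →
    (∃ a', a = '_' :: a') → (∃ b', b = '_' :: b') →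
    p ++ a <+: t ++ b → p = t ∧ a <+: b := by
  induction p with
  | nil =>
    intro t a b _ ht ⟨a', ha⟩ _ hpre
    cases t with
    | nil => exact ⟨rfl, by simpa using hpre⟩
    | cons c t' =>
      subst ha
      simp only [List.nil_append, List.cons_append] at hpre
      rcases List.cons_prefix_cons.1 hpre with ⟨hc, _⟩
      exact absurd (hc ▸ List.mem_cons_self) ht
  | cons d p' ih =>
    intro t a b hp ht ha ⟨b', hb⟩ hpre
    cases t with
    | nil =>
      subst hb
      simp only [List.cons_append, List.nil_append] at hpre
      rcases List.cons_prefix_cons.1 hpre with ⟨hc, _⟩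
      exact absurd (by simp [hc]) hp
    | cons e t' =>
      simp only [List.cons_append] at hpre
      rcases List.cons_prefix_cons.1 hpre with ⟨hde, hrest⟩
      have := ih t' a b (fun h => hp (List.mem_cons_of_mem _ h))
        (fun h => ht (List.mem_cons_of_mem _ h)) ha ⟨b', hb⟩ hrest
      exact ⟨by rw [hde, this.1], this.2⟩

theorem pad_prefix (ps : List (List Char)) : ∀ ts, (∀ t ∈ ps, '_' ∉ t) → (∀ t ∈ ts, '_' ∉ t) →
    pad ps <+: pad ts → ps <+: ts := by
  induction ps with
  | nil => intro ts _ _ _; exact List.nil_prefix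
  | cons p ps' ih =>
    intro ts hp ht hpre
    cases ts with
    | nil =>
      exfalso
      have hlen := hpre.length_le
      simp [pad, pad_eq_padOpen] at hlen
    | cons t ts' =>
      simp only [pad] at hpre
      have h2 := List.cons_prefix_cons.1 hpre |>.2
      have := uf_split p t (pad ps') (pad ts') (hp p List.mem_cons_self)
        (ht t List.mem_cons_self) (pad_head ps') (pad_head ts') h2
      have hps := ih ts' (fun x hx => hp x (List.mem_cons_of_mem _ hx))
        (fun x hx => ht x (List.mem_cons_of_mem _ hx)) this.2
      exact List.cons_prefix_cons.2 ⟨this.1, hps⟩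

theorem shift_lemma (t : List Char) : ∀ (l r x m : List Char), '_' ∉ t → (∃ u, x = '_' :: u) →
    l ++ x ++ r = t ++ m → x <:+: m := by
  induction t with
  | nil =>
    intro l r x m _ _ heq
    simp only [List.nil_append] at heq
    exact ⟨l, r, heq⟩
  | cons c t' ih =>
    intro l r x m ht ⟨u, hx⟩ heq
    cases l with
    | nil =>
      subst hx
      simp only [List.nil_append, List.cons_append] at heq
      have : '_' = c := by injection heq
      exact absurd (by simp [← this]) ht
    | cons d l' =>
      simp only [List.cons_append] at heq
      injection heq with _ heq2
      exact ih l' r x m (fun h => ht (List.mem_cons_of_mem _ h)) ⟨u, hx⟩ heq2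

theorem pad_infix_iff (ts : List (List Char)) : ∀ ps, (∀ t ∈ ps, '_' ∉ t) → (∀ t ∈ ts, '_' ∉ t) →
    (pad ps <:+: pad ts ↔ ps <:+: ts) := by
  induction ts with
  | nil =>
    intro ps hp _
    constructor
    · intro h
      cases ps with
      | nil => exact List.nil_infix
      | cons p ps' =>
        exfalso
        have hlen := h.length_le
        simp [pad, pad_eq_padOpen] at hlen
    · intro h
      have := List.eq_nil_of_infix_nil h
      subst this
      exact List.infix_rfl
  | cons t ts' ih =>
    intro ps hp ht
    constructor
    · rintro ⟨l, r, heq⟩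
      cases ps with
      | nil => exact List.nil_infix
      | cons p ps' =>
        cases l with
        | nil =>
          have hpre : pad (p :: ps') <+: pad (t :: ts') := ⟨r, by simpa using heq⟩
          exact (pad_prefix _ _ hp ht hpre).isInfix
        | cons c l' =>
          simp only [pad, List.cons_append] at heq
          injection heq with _ heq2
          have hinf : pad (p :: ps') <:+: pad ts' :=
            shift_lemma t l' r (pad (p :: ps')) (pad ts') (ht t List.mem_cons_self)
              (pad_head _) (by simpa [pad] using heq2)
          have := (ih (p :: ps') hp (fun x hx => ht x (List.mem_cons_of_mem _ hx))).1 hinf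
          exact List.infix_cons this
    · rintro ⟨u, v, heq⟩
      rw [← heq]
      have h1 : u ++ ps ++ v = u ++ (ps ++ v) := by simp
      rw [h1, pad_append, pad_append]
      rcases pad_head v with ⟨v', hv⟩
      rw [hv, pad_eq_padOpen ps]
      exact ⟨padOpen u, v', by simp⟩

theorem windowScan_eq (ps ts : List (List Char)) :
    ((PySem.List.pyRange 0 ((ts.length : Int) - (ps.length : Int) + 1) 1).any fun i =>
      PySem.List.slice ts (some i) (some (i + (ps.length : Int))) == ps)
    = decide (ps <:+: ts) := by
  by_cases h : ps <:+: ts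
  · simp only [h, decide_true]
    rcases h with ⟨l, r, heq⟩
    rw [List.any_eq_true]
    refine ⟨(l.length : Int), ?_, ?_⟩
    · rw [PySem.List.mem_pyRange_one]
      have := congrArg List.length heq
      simp at this
      constructor
      · positivity
      · omega
    · have hb : (l.length : Int) + (ps.length : Int) = ((l.length + ps.length : Nat) : Int) := by push_cast; ring
      rw [hb, PySem.List.slice_natCast]
      have hdrop : ts.drop l.length = ps ++ r := by
        rw [← heq]; simp
      rw [hdrop]
      simp
  · simp only [h, decide_false]
    rw [List.any_eq_false]
    intro i hi
    rw [PySem.List.mem_pyRange_one] at hi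
    obtain ⟨h0, hlt⟩ := hi
    have hi' : i = ((i.toNat : Nat) : Int) := by omega
    rw [hi']
    have hb : ((i.toNat : Nat) : Int) + (ps.length : Int) = ((i.toNat + ps.length : Nat) : Int) := by push_cast; ring
    rw [hb, PySem.List.slice_natCast]
    simp only [Nat.add_sub_cancel_left]
    intro heq
    rw [beq_iff_eq] at heq
    apply h
    rw [← heq]
    exact ((List.take_prefix _ _).isInfix).trans ((List.drop_suffix _ _).isInfix)

theorem hasTokenRun_eq (name : String) (f : List Char) :
    hasTokenRun name (PySem.Chars.splitOn f ['_']) = decide (myTokens name.toList <:+: myTokens f) := by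
  unfold hasTokenRun
  rw [splitOn_eq_myTokens, splitOn_eq_myTokens, windowScan_eq]

theorem key_test (name : String) (f : List Char) :
    PySem.Chars.isIn ('_' :: (name.toList ++ ['_'])) ('_' :: (f ++ ['_']))
      = hasTokenRun name (PySem.Chars.splitOn f ['_']) := by
  rw [hasTokenRun_eq]
  have h1 : '_' :: (name.toList ++ ['_']) = pad (myTokens name.toList) := (pad_myTokens _).symm
  have h2 : '_' :: (f ++ ['_']) = pad (myTokens f) := (pad_myTokens _).symm
  rw [h1, h2]
  by_cases hin : myTokens name.toList <:+: myTokens f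
  · simp only [hin, decide_true]
    rw [PySem.Chars.isIn_iff_infix]
    exact (pad_infix_iff _ _ (myTokens_uf _) (myTokens_uf _)).2 hin
  · simp only [hin, decide_false]
    rw [PySem.Chars.isIn_eq_false_iff]
    intro hc
    exact hin ((pad_infix_iff _ _ (myTokens_uf _) (myTokens_uf _)).1 hc)

-- ===== VERDICT (by name: the statement is the Claim_ definition above) =====
theorem should_append_spec : Claim_equal_should_append := by
  intro filename comment _
  show should_append filename comment = should_append_alt filename comment
  simp only [should_append, should_append_alt, checkRules, RULES, key_test]
  rfl
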